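-- pv_equiv track=rewrite | github.com/AhaanSh/MHacks-2025- | agent/business_logic.py | _is_reset_command_text
-- ===== SOURCE A (Python) =====
-- def _is_reset_command_text(text: str) -> bool:
--     if not text:
--         return False
--     t = text.lower()
--     phrases = [
--         "reset filters", "clear filters", "reset search", "clear search",
--         "start over", "clear all filters", "clear all", "reset all filters"
--     ]
--     for p in phrases:
--         if p in t:
--             return True
--     return False
-- ===== SOURCE B (Python) =====
-- _PHRASES = [
--     "reset filters", "clear filters", "reset search", "clear search",
--     "start over", "clear all filters", "clear all", "reset all filters"
-- ]
--
-- def _is_reset_command_text(text: str) -> bool: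
--     t = text.lower()
--     i = 0
--     n = len(t)
--     while i < n:
--         for p in _PHRASES:
--             if t.startswith(p, i):
--                 return True
--         i += 1
--     return False
-- ===== Notes on version B (the rewrite author's own statement) =====
-- stated objective: alternative
-- what changed: A scans the whole text once per phrase with repeated substring-membership tests; B makes a single position-major pass over the text, testing every phrase as a prefix at each position.
import Mathlib
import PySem

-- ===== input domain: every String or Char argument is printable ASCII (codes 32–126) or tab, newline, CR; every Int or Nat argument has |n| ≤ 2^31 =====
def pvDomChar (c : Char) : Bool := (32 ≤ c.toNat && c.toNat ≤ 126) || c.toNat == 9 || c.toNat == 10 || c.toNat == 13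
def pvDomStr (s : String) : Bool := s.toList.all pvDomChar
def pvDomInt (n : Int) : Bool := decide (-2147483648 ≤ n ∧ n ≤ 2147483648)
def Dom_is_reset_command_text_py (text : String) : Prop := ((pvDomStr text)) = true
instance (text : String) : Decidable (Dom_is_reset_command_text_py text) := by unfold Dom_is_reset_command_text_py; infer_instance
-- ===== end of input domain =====

-- B replaces A's phrase-major loop of repeated 'p in t' substring scans by a single
-- position-major scan testing every phrase as a prefix at each position (objective: alternative).

-- ===== PORT A =====
def pyPhrasesA : List String :=
  ["reset filters", "clear filters", "reset search", "clear search",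
   "start over", "clear all filters", "clear all", "reset all filters"]

def is_reset_command_text_py (text : String) : Bool :=
  if text = "" then false
  else
    let t := PySem.Str.lower text
    -- 'for p in phrases: if p in t: return True' / 'return False'
    pyPhrasesA.any (fun p => PySem.Str.isIn p t)

-- ===== PORT B =====
def pvPhrasesB : List (List Char) :=
  ["reset filters".toList, "clear filters".toList, "reset search".toList,
   "clear search".toList, "start over".toList, "clear all filters".toList,
   "clear all".toList, "reset all filters".toList]

-- the 'while i < n' loop of Source B, as structural recursion on the suffix starting at i;
-- 't.startswith(p, i)' is exactly Chars.startswith of that suffix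
def pvScan : List Char → Bool
  | [] => false
  | c :: rest =>
    if pvPhrasesB.any (fun p => PySem.Chars.startswith (c :: rest) p) then true
    else pvScan rest

def is_reset_command_text_py_alt (text : String) : Bool :=
  pvScan (PySem.Str.lower text).toList

-- ===== PRECONDITION & SPEC =====
def Spec_is_reset_command_text_py (text : String) (out : Bool) : Prop := out = is_reset_command_text_py_alt text
instance (text : String) (out : Bool) : Decidable (Spec_is_reset_command_text_py text out) := by unfold Spec_is_reset_command_text_py; infer_instance

-- ===== CLAIM (what is proved, stated in full; the proofs are below) =====
def Claim_equal_is_reset_command_text_py : Prop := ∀ (text : String), Dom_is_reset_command_text_py text → Spec_is_reset_command_text_py text (is_reset_command_text_py text)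

-- ===== LEMMAS AND PROOFS =====

theorem pvScan_iff (l : List Char) : pvScan l = true ↔ ∃ p ∈ pvPhrasesB, p <:+: l := by
  induction l with
  | nil =>
    simp only [pvScan, Bool.false_eq_true, false_iff]
    rintro ⟨p, hp, hinf⟩
    have : p ≠ [] := by fin_cases hp <;> decide
    exact this (List.eq_nil_of_infix_nil hinf)
  | cons c rest ih =>
    simp only [pvScan]
    by_cases h : pvPhrasesB.any (fun p => PySem.Chars.startswith (c :: rest) p) = true
    · rw [if_pos h]
      refine iff_of_true rfl ?_
      rcases List.any_eq_true.mp h with ⟨p, hp, hpre⟩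
      exact ⟨p, hp, ((PySem.Chars.startswith_iff _ _).mp hpre).isInfix⟩
    · rw [if_neg h, ih]
      constructor
      · rintro ⟨p, hp, hinf⟩; exact ⟨p, hp, hinf.trans (List.infix_cons (List.infix_refl _))⟩
      · rintro ⟨p, hp, hinf⟩
        rcases List.infix_cons_iff.mp hinf with hpre | hinf'
        · exact absurd (List.any_eq_true.mpr ⟨p, hp, (PySem.Chars.startswith_iff _ _).mpr hpre⟩) h
        · exact ⟨p, hp, hinf'⟩

theorem pvA_iff (t : String) :
    pyPhrasesA.any (fun p => PySem.Str.isIn p t) = true ↔ ∃ p ∈ pvPhrasesB, p <:+: t.toList := by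
  rw [List.any_eq_true]
  constructor
  · rintro ⟨p, hp, hin⟩
    refine ⟨p.toList, by fin_cases hp <;> decide, ?_⟩
    have := hin
    simp only [PySem.Str.isIn_eq] at this
    exact (PySem.Chars.isIn_iff_infix _ _).mp this
  · rintro ⟨p, hp, hinf⟩
    have : ∃ q ∈ pyPhrasesA, q.toList = p := by fin_cases hp <;> exact ⟨_, by decide, rfl⟩
    rcases this with ⟨q, hq, hqp⟩
    refine ⟨q, hq, ?_⟩
    simp only [PySem.Str.isIn_eq]
    exact (PySem.Chars.isIn_iff_infix _ _).mpr (hqp ▸ hinf)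

-- ===== VERDICT (by name: the statement is the Claim_ definition above) =====
theorem is_reset_command_text_py_spec : Claim_equal_is_reset_command_text_py := by
  intro text _
  unfold Spec_is_reset_command_text_py is_reset_command_text_py is_reset_command_text_py_alt
  by_cases h : text = ""
  · subst h; decide
  · simp only [h, if_false]
    rw [Bool.eq_iff_iff, pvScan_iff, pvA_iff]
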